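-- pv_equiv track=rewrite | github.com/Fijuwat/Software_Design | Meet.py | earliestPossibleMeeting
-- ===== SOURCE A (Python) =====
-- def earliestPossibleMeeting(person1, person2, duration):
-- 	newp1 = []
-- 	newp2 = []
-- 	for p in person1:
-- 		if (p[1] - p[0]) >= duration:
-- 			newp1.append(p)
--
-- 	for p in person2:
-- 		if (p[1] - p[0]) >= duration:
-- 			newp2.append(p)
--
-- 	available = []
-- 	for time in newp1:
-- 		count = 0
-- 		for time2 in newp2:
-- 			#or (time[0] < time2[0] and time[1] < time2[0])
-- 			if (time[0] >= time2[0] and time[1] <= time2[1]):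
-- 		# 		count += 1
-- 		# if count == len(person2):
-- 				available.append(time)
--
-- 	for time in newp2:
-- 		count = 0
-- 		for time2 in newp1:
-- 			#or (time[0] < time2[0] and time[1] < time2[0])
-- 			if (time[0] >= time2[0] and time[1] <= time2[1]):
-- 		# 		count += 1
-- 		# if count == len(person2):
-- 				available.append(time)
--
-- 	# for time in person2:
-- 	# 	count = 0
-- 	# 	for time2 in person1:
-- 	# 		if (time[0] > time2[1] and time[1] > time2[1]) or (time[0] < time2[0] and time[1] < time2[0]):
-- 	# 			count += 1
-- 	# 	if count == len(person2):
-- 	# 		available.append(time)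
--
--
-- 	for ele in available:
-- 		if ele[1] - ele[0] >= duration:
-- 			continue
-- 		else:
-- 			available.remove(ele)
--
-- 	minimum = 9999
-- 	for ele in available:
-- 		if ele[0] < minimum:
-- 			minimum = ele[0]
--
-- 	for ele in available:
-- 		if ele[0] == minimum:
-- 			return [ele[0], ele[0] + duration]
--
-- 	return []
-- ===== SOURCE B (Python) =====
-- def earliestPossibleMeeting(person1, person2, duration):
-- 	# Sweep: sort each side's long-enough intervals by start; merge through the
-- 	# other side keeping the running max end, so containment is O(1) per interval.
-- 	def firstContainedStart(ts, us):
-- 		ts = sorted([(t[0], t[1]) for t in ts if t[1] - t[0] >= duration],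
-- 		            key=lambda p: p[0])
-- 		us = sorted([(u[0], u[1]) for u in us if u[1] - u[0] >= duration],
-- 		            key=lambda p: p[0])
-- 		best = None
-- 		j = 0
-- 		for s, e in ts:
-- 			while j < len(us) and us[j][0] <= s:
-- 				if best is None or us[j][1] > best:
-- 					best = us[j][1]
-- 				j += 1
-- 			if best is not None and e <= best:
-- 				return s
-- 		return None
--
-- 	a = firstContainedStart(person1, person2)
-- 	b = firstContainedStart(person2, person1)
-- 	if a is None:
-- 		m = b
-- 	elif b is None:
-- 		m = a
-- 	else:
-- 		m = min(a, b)
-- 	if m is None: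
-- 		return []
-- 	return [m, m + duration]
-- ===== Notes on version B (the rewrite author's own statement) =====
-- stated objective: alternative
-- what changed: B replaces A's all-pairs containment scans (plus duplicate-append, a no-op remove pass and a sentinel min scan) by sorting each side's long-enough intervals by start and merging with a running maximum end, returning the first (= earliest) contained start directly.
-- intended difference: On inputs where some long-enough interval of one person nests inside one of the other but every such interval starts after 9999, A's `minimum = 9999` sentinel makes it return [] although a meeting exists; B returns the earliest window [m, m+duration], which is the intended value. — e.g. on earliestPossibleMeeting([[10000, 10001]], [[10000, 10001]], 1): A returns [], B returns [10000, 10001]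
import Mathlib
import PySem

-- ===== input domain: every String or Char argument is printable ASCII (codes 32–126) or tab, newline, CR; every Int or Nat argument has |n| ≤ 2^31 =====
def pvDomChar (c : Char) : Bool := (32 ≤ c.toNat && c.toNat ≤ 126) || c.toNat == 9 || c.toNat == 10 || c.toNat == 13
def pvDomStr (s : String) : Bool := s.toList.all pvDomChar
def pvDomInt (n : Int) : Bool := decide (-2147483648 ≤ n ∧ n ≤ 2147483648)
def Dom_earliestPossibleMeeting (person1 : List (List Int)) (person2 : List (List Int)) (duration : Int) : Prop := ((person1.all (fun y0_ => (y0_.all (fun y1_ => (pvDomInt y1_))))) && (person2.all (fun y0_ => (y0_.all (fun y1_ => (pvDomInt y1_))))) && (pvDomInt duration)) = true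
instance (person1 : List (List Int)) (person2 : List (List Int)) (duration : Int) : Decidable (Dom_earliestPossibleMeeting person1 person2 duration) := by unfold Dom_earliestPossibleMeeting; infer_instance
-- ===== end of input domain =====

-- B replaces A's all-pairs containment scans by a sort + merge sweep with a running maximum
-- end, and drops A's 9999 sentinel: on inputs whose earliest nested start exceeds 9999
-- A returns [] while B returns the window (stated as D_ below).

-- ===== PORT A =====
-- Python p[0] / p[1]: exact under Pre_ (every interval has length ≥ 2); ported as List.getD.
def aFilter (l : List (List Int)) (d : Int) : List (List Int) :=
  l.foldl (fun acc p => if p.getD 1 0 - p.getD 0 0 ≥ d then acc ++ [p] else acc) []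

def aPairLoop (outer inner : List (List Int)) (acc0 : List (List Int)) : List (List Int) :=
  outer.foldl (fun acc t =>
    inner.foldl (fun a u =>
      if u.getD 0 0 ≤ t.getD 0 0 ∧ t.getD 1 0 ≤ u.getD 1 0 then a ++ [t] else a) acc) acc0

-- Python's `for ele in available: … available.remove(ele)` — iterator index i advances by one
-- each iteration over the (possibly mutated) list; remove deletes the first equal element.
def aRemovePass (d : Int) : List (List Int) → Nat → Nat → List (List Int)
  | l, _, 0 => l
  | l, i, fuel+1 =>
    match l[i]? with
    | none => l
    | some ele =>
      if ele.getD 1 0 - ele.getD 0 0 ≥ d then aRemovePass d l (i+1) fuel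
      else aRemovePass d ((PySem.List.remove? l ele).getD l) (i+1) fuel

def aFind (m d : Int) : List (List Int) → List Int
  | [] => []
  | e :: rest => if e.getD 0 0 = m then [e.getD 0 0, e.getD 0 0 + d] else aFind m d rest

def earliestPossibleMeeting (person1 : List (List Int)) (person2 : List (List Int)) (duration : Int) : List Int :=
  let newp1 := aFilter person1 duration
  let newp2 := aFilter person2 duration
  let available := aPairLoop newp1 newp2 []
  let available := aPairLoop newp2 newp1 available
  let available := aRemovePass duration available 0 available.length
  let minimum := available.foldl (fun m e => if e.getD 0 0 < m then e.getD 0 0 else m) 9999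
  aFind minimum duration available

-- ===== PORT B =====
def bPairs (l : List (List Int)) (d : Int) : List (Int × Int) :=
  PySem.List.sorted ((l.filter (fun t => decide (t.getD 1 0 - t.getD 0 0 ≥ d))).map
    (fun t => (t.getD 0 0, t.getD 1 0))) (fun p => p.1) false

-- the inner `while j < len(us) and us[j][0] <= s` loop: state = (remaining suffix of us, best)
def bAdvance (s : Int) : List (Int × Int) → Option Int → List (Int × Int) × Option Int
  | [], best => ([], best)
  | (u0, u1) :: rest, best =>
    if u0 ≤ s then
      bAdvance s rest (some (match best with
        | none => u1
        | some b => if u1 > b then u1 else b))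
    else ((u0, u1) :: rest, best)

def bGo : List (Int × Int) → List (Int × Int) → Option Int → Option Int
  | [], _, _ => none
  | (s, e) :: ts, us, best =>
    let p := bAdvance s us best
    if (match p.2 with | none => false | some b => decide (e ≤ b)) then some s
    else bGo ts p.1 p.2

def bSide (ts us : List (List Int)) (d : Int) : Option Int :=
  bGo (bPairs ts d) (bPairs us d) none

def earliestPossibleMeeting_alt (person1 : List (List Int)) (person2 : List (List Int)) (duration : Int) : List Int :=
  let a := bSide person1 person2 duration
  let b := bSide person2 person1 duration
  let m : Option Int :=
    match a, b with
    | none, b => b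
    | some x, none => some x
    | some x, some y => some (min x y)
  match m with
  | none => []
  | some m => [m, m + duration]

-- ===== PRECONDITION & SPEC =====
-- Pre_ excludes exactly the inputs on which Python A raises IndexError: an interval list with
-- fewer than two entries.
def Pre_earliestPossibleMeeting (person1 : List (List Int)) (person2 : List (List Int)) (duration : Int) : Prop :=
  (∀ p ∈ person1, 2 ≤ p.length) ∧ (∀ p ∈ person2, 2 ≤ p.length)
instance (person1 : List (List Int)) (person2 : List (List Int)) (duration : Int) : Decidable (Pre_earliestPossibleMeeting person1 person2 duration) := by unfold Pre_earliestPossibleMeeting; infer_instance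

def pvWitness_earliestPossibleMeeting : List (List Int) × List (List Int) × Int := ([[0, 2]], [[0, 3]], 1)

-- D_-side vocabulary (input shape only): an interval long enough for the meeting, and an
-- interval of the other person that covers it.
abbrev longEnough (d : Int) (t : List Int) : Prop := d + t.getD 0 0 ≤ t.getD 1 0
abbrev coveredIn (d : Int) (t : List Int) (l : List (List Int)) : Prop :=
  0 < l.countP (fun u => decide (d + u.getD 0 0 ≤ u.getD 1 0 ∧
    ¬ t.getD 0 0 < u.getD 0 0 ∧ ¬ u.getD 1 0 < t.getD 1 0))

-- On inputs where some long-enough interval of one person nests inside one of the other but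
-- every such interval starts after time 9999, A's sentinel `minimum = 9999` makes A return []
-- although a meeting exists; B returns the earliest window [m, m+duration], which is intended.
def D_earliestPossibleMeeting (person1 : List (List Int)) (person2 : List (List Int)) (duration : Int) : Prop :=
  ((∃ t ∈ person1, longEnough duration t ∧ coveredIn duration t person2) ∨
   (∃ t ∈ person2, longEnough duration t ∧ coveredIn duration t person1)) ∧
  (∀ t ∈ person1, longEnough duration t → coveredIn duration t person2 → 9999 < t.getD 0 0) ∧
  (∀ t ∈ person2, longEnough duration t → coveredIn duration t person1 → 9999 < t.getD 0 0)
instance (person1 : List (List Int)) (person2 : List (List Int)) (duration : Int) : Decidable (D_earliestPossibleMeeting person1 person2 duration) := by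
  unfold D_earliestPossibleMeeting; infer_instance

def Spec_earliestPossibleMeeting (person1 : List (List Int)) (person2 : List (List Int)) (duration : Int) (out : List Int) : Prop := ¬ D_earliestPossibleMeeting person1 person2 duration → out = earliestPossibleMeeting_alt person1 person2 duration
instance (person1 : List (List Int)) (person2 : List (List Int)) (duration : Int) (out : List Int) : Decidable (Spec_earliestPossibleMeeting person1 person2 duration out) := by unfold Spec_earliestPossibleMeeting; infer_instance

def pvDiffWitness_earliestPossibleMeeting : List (List Int) × List (List Int) × Int := ([[10000, 10001]], [[10000, 10001]], 1)
def pvDiffWitnessOut_earliestPossibleMeeting : (List Int) × (List Int) := ([], [10000, 10001])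

-- ===== CLAIM (what is proved, stated in full; the proofs are below) =====
def Claim_unchanged_earliestPossibleMeeting : Prop := ∀ (person1 : List (List Int)) (person2 : List (List Int)) (duration : Int), Dom_earliestPossibleMeeting person1 person2 duration → Pre_earliestPossibleMeeting person1 person2 duration → Spec_earliestPossibleMeeting person1 person2 duration (earliestPossibleMeeting person1 person2 duration)
def Claim_changed_earliestPossibleMeeting : Prop := Dom_earliestPossibleMeeting (pvDiffWitness_earliestPossibleMeeting.1) (pvDiffWitness_earliestPossibleMeeting.2.1) (pvDiffWitness_earliestPossibleMeeting.2.2) ∧ Pre_earliestPossibleMeeting (pvDiffWitness_earliestPossibleMeeting.1) (pvDiffWitness_earliestPossibleMeeting.2.1) (pvDiffWitness_earliestPossibleMeeting.2.2) ∧ D_earliestPossibleMeeting (pvDiffWitness_earliestPossibleMeeting.1) (pvDiffWitness_earliestPossibleMeeting.2.1) (pvDiffWitness_earliestPossibleMeeting.2.2) ∧ earliestPossibleMeeting (pvDiffWitness_earliestPossibleMeeting.1) (pvDiffWitness_earliestPossibleMeeting.2.1) (pvDiffWitness_earliestPossibleMeeting.2.2) = pvDiffWitnessOut_earliestPossibleMeeting.1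 ∧ earliestPossibleMeeting_alt (pvDiffWitness_earliestPossibleMeeting.1) (pvDiffWitness_earliestPossibleMeeting.2.1) (pvDiffWitness_earliestPossibleMeeting.2.2) = pvDiffWitnessOut_earliestPossibleMeeting.2 ∧ pvDiffWitnessOut_earliestPossibleMeeting.1 ≠ pvDiffWitnessOut_earliestPossibleMeeting.2
def Claim_exact_earliestPossibleMeeting : Prop := ∀ (person1 : List (List Int)) (person2 : List (List Int)) (duration : Int), Dom_earliestPossibleMeeting person1 person2 duration → Pre_earliestPossibleMeeting person1 person2 duration → D_earliestPossibleMeeting person1 person2 duration → earliestPossibleMeeting person1 person2 duration ≠ earliestPossibleMeeting_alt person1 person2 duration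


-- ===== LEMMAS AND PROOFS =====

-- proof-layer predicates (the shapes the port lemmas naturally produce)
abbrev dOk (d : Int) (t : List Int) : Prop := t.getD 1 0 - t.getD 0 0 ≥ d
abbrev dCont (d : Int) (t : List Int) (l : List (List Int)) : Prop :=
  ∃ u ∈ l, dOk d u ∧ u.getD 0 0 ≤ t.getD 0 0 ∧ t.getD 1 0 ≤ u.getD 1 0

lemma longEnough_iff (d : Int) (t : List Int) : longEnough d t ↔ dOk d t := by
  unfold longEnough dOk; omega

lemma coveredIn_iff (d : Int) (t : List Int) (l : List (List Int)) :
    coveredIn d t l ↔ dCont d t l := by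
  unfold coveredIn dCont
  rw [List.countP_pos_iff]
  constructor
  · rintro ⟨u, hu, hp⟩
    simp only [decide_eq_true_eq] at hp
    exact ⟨u, hu, by unfold dOk; omega, by omega, by omega⟩
  · rintro ⟨u, hu, hok, h1, h2⟩
    exact ⟨u, hu, by simp only [decide_eq_true_eq]; unfold dOk at hok; omega⟩

lemma D_iff (p1 p2 : List (List Int)) (d : Int) :
    D_earliestPossibleMeeting p1 p2 d ↔
      (((∃ t ∈ p1, dOk d t ∧ dCont d t p2) ∨ (∃ t ∈ p2, dOk d t ∧ dCont d t p1)) ∧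
       (∀ t ∈ p1, dOk d t → dCont d t p2 → 9999 < t.getD 0 0) ∧
       (∀ t ∈ p2, dOk d t → dCont d t p1 → 9999 < t.getD 0 0)) := by
  unfold D_earliestPossibleMeeting
  simp only [longEnough_iff, coveredIn_iff]

-- the elements A works with: long-enough intervals of one person nested in one of the other
def QQ (p1 p2 : List (List Int)) (d : Int) (x : List Int) : Prop :=
  (x ∈ p1 ∧ dOk d x ∧ dCont d x p2) ∨ (x ∈ p2 ∧ dOk d x ∧ dCont d x p1)

lemma aFilter_eq (l : List (List Int)) (d : Int) :
    aFilter l d = l.filter (fun p => decide (dOk d p)) := by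
  unfold aFilter
  have h := PySem.List.foldl_append_if (fun p : List Int => decide (dOk d p)) id l []
  simp only [decide_eq_true_eq] at h
  simpa [dOk, ge_iff_le] using h

lemma aPairLoop_eq (outer inner : List (List Int)) (acc0 : List (List Int)) :
    aPairLoop outer inner acc0 = acc0 ++ outer.flatMap (fun t =>
      (inner.filter (fun u => decide (u.getD 0 0 ≤ t.getD 0 0 ∧ t.getD 1 0 ≤ u.getD 1 0))).map
        (fun _ => t)) := by
  induction outer generalizing acc0 with
  | nil => simp [aPairLoop]
  | cons t ts ih =>
    have hin := PySem.List.foldl_append_if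
      (fun u : List Int => decide (u.getD 0 0 ≤ t.getD 0 0 ∧ t.getD 1 0 ≤ u.getD 1 0))
      (fun _ => t) inner acc0
    simp only [decide_eq_true_eq] at hin
    simp only [aPairLoop, List.foldl_cons] at *
    rw [hin, ih]
    simp

lemma mem_avail (p1 p2 : List (List Int)) (d : Int) (x : List Int) :
    x ∈ aPairLoop (aFilter p2 d) (aFilter p1 d) (aPairLoop (aFilter p1 d) (aFilter p2 d) []) ↔
      QQ p1 p2 d x := by
  rw [aPairLoop_eq, aPairLoop_eq, aFilter_eq, aFilter_eq]
  simp only [QQ, dCont, dOk, List.mem_append, List.mem_flatMap, List.mem_map, List.mem_filter,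
    List.nil_append, decide_eq_true_eq]
  aesop

lemma aRemovePass_id (d : Int) : ∀ (fuel : Nat) (l : List (List Int)) (i : Nat),
    (∀ e ∈ l, dOk d e) → aRemovePass d l i fuel = l := by
  intro fuel
  induction fuel with
  | zero => intro l i _; rfl
  | succ n ih =>
    intro l i h
    unfold aRemovePass
    cases hg : l[i]? with
    | none => rfl
    | some ele =>
      have hok : dOk d ele := h _ (List.mem_of_getElem? hg)
      show (if ele.getD 1 0 - ele.getD 0 0 ≥ d then aRemovePass d l (i+1) n
            else aRemovePass d ((PySem.List.remove? l ele).getD l) (i+1) n) = l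
      rw [if_pos hok]
      exact ih l (i+1) h

lemma minFold_spec : ∀ (l : List (List Int)) (a : Int),
    (l.foldl (fun m e => if e.getD 0 0 < m then e.getD 0 0 else m) a ≤ a) ∧
    (∀ e ∈ l, l.foldl (fun m e => if e.getD 0 0 < m then e.getD 0 0 else m) a ≤ e.getD 0 0) ∧
    (l.foldl (fun m e => if e.getD 0 0 < m then e.getD 0 0 else m) a = a ∨
      ∃ e ∈ l, e.getD 0 0 = l.foldl (fun m e => if e.getD 0 0 < m then e.getD 0 0 else m) a) := by
  intro l
  induction l with
  | nil => intro a; simp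
  | cons e t ih =>
    intro a
    simp only [List.foldl_cons]
    obtain ⟨h1, h2, h3⟩ := ih (if e.getD 0 0 < a then e.getD 0 0 else a)
    have h4 : (if e.getD 0 0 < a then e.getD 0 0 else a) ≤ a ∧
        (if e.getD 0 0 < a then e.getD 0 0 else a) ≤ e.getD 0 0 := by split_ifs <;> omega
    refine ⟨le_trans h1 h4.1, ?_, ?_⟩
    · intro x hx
      rcases List.mem_cons.mp hx with rfl | hx
      · exact le_trans h1 h4.2
      · exact h2 _ hx
    · rcases h3 with h3 | ⟨x, hx, hv⟩
      · by_cases hc : e.getD 0 0 < a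
        · rw [if_pos hc] at h3 ⊢
          exact Or.inr ⟨e, List.mem_cons_self, h3.symm⟩
        · rw [if_neg hc] at h3 ⊢
          exact Or.inl h3
      · exact Or.inr ⟨x, List.mem_cons_of_mem _ hx, hv⟩

lemma aFind_attained (m d : Int) : ∀ (l : List (List Int)),
    (∃ e ∈ l, e.getD 0 0 = m) → aFind m d l = [m, m + d] := by
  intro l
  induction l with
  | nil => rintro ⟨e, he, -⟩; simp at he
  | cons e t ih =>
    rintro ⟨x, hx, hv⟩
    unfold aFind
    by_cases hc : e.getD 0 0 = m
    · rw [if_pos hc, hc]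
    · rw [if_neg hc]
      rcases List.mem_cons.mp hx with rfl | hx
      · exact absurd hv hc
      · exact ih ⟨x, hx, hv⟩

lemma aFind_nil (m d : Int) : ∀ (l : List (List Int)),
    (∀ e ∈ l, e.getD 0 0 ≠ m) → aFind m d l = [] := by
  intro l
  induction l with
  | nil => intro _; rfl
  | cons e t ih =>
    intro h
    unfold aFind
    rw [if_neg (h e List.mem_cons_self)]
    exact ih fun x hx => h x (List.mem_cons_of_mem _ hx)

-- ===== B-side lemmas =====

def bestP (b : Option Int) (q : Int) : Prop := ∃ x, b = some x ∧ q ≤ x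

lemma bGo_cons (s e : Int) (ts us : List (Int × Int)) (best : Option Int) :
    bGo ((s, e) :: ts) us best =
      (if (match (bAdvance s us best).2 with | none => false | some b => decide (e ≤ b)) = true
       then some s else bGo ts (bAdvance s us best).1 (bAdvance s us best).2) := rfl

lemma bAdvance_spec (s : Int) : ∀ (us : List (Int × Int)) (best : Option Int),
    ∃ popped, us = popped ++ (bAdvance s us best).1 ∧
      (∀ c ∈ popped, c.1 ≤ s) ∧
      (us.Pairwise (fun a b => a.1 ≤ b.1) → ∀ u ∈ (bAdvance s us best).1, s < u.1) ∧
      (∀ q, bestP (bAdvance s us best).2 q ↔ bestP best q ∨ ∃ c ∈ popped, q ≤ c.2) := by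
  intro us
  induction us with
  | nil =>
    intro best
    exact ⟨[], by simp [bAdvance], by simp, by simp [bAdvance], by simp [bAdvance]⟩
  | cons u rest ih =>
    intro best
    obtain ⟨u0, u1⟩ := u
    by_cases hc : u0 ≤ s
    · obtain ⟨nb, hadv, hupd⟩ : ∃ nb, bAdvance s ((u0, u1) :: rest) best = bAdvance s rest (some nb) ∧
          (∀ q, q ≤ nb ↔ bestP best q ∨ q ≤ u1) := by
        cases best with
        | none => exact ⟨u1, by simp [bAdvance, hc], by simp [bestP]⟩
        | some b =>
          refine ⟨if u1 > b then u1 else b, by simp [bAdvance, hc], ?_⟩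
          intro q
          by_cases h : u1 > b <;> simp [bestP, h] <;> omega
      obtain ⟨popped, hsplit, hple, hrem, hbest⟩ := ih (some nb)
      refine ⟨(u0, u1) :: popped, ?_, ?_, ?_, ?_⟩
      · rw [hadv]; simpa using hsplit
      · intro c hcm
        rcases List.mem_cons.mp hcm with rfl | hcm
        · exact hc
        · exact hple c hcm
      · intro hp u hu
        rw [hadv] at hu
        exact hrem (List.Pairwise.of_cons hp) u hu
      · intro q
        rw [hadv, hbest q]
        have hnb : bestP (some nb) q ↔ bestP best q ∨ q ≤ u1 := by
          rw [show bestP (some nb) q ↔ q ≤ nb by simp [bestP]]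
          exact hupd q
        rw [hnb]
        simp only [List.mem_cons]
        constructor
        · rintro ((h | h) | ⟨c, hcm, hq⟩)
          · exact Or.inl h
          · exact Or.inr ⟨(u0, u1), Or.inl rfl, h⟩
          · exact Or.inr ⟨c, Or.inr hcm, hq⟩
        · rintro (h | ⟨c, hcm | hcm, hq⟩)
          · exact Or.inl (Or.inl h)
          · subst hcm; exact Or.inl (Or.inr hq)
          · exact Or.inr ⟨c, hcm, hq⟩
    · refine ⟨[], by simp [bAdvance, hc], by simp, ?_, by simp [bAdvance, hc]⟩
      intro hp u hu
      have hadv : bAdvance s ((u0, u1) :: rest) best = ((u0, u1) :: rest, best) := by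
        simp [bAdvance, hc]
      rw [hadv] at hu
      rcases List.mem_cons.mp hu with rfl | hu
      · simpa using by omega
      · have := List.rel_of_pairwise_cons hp hu
        simp only at this
        omega

lemma bGo_find : ∀ (ts us : List (Int × Int)) (best : Option Int) (consumed : List (Int × Int)),
    ts.Pairwise (fun a b => a.1 ≤ b.1) → us.Pairwise (fun a b => a.1 ≤ b.1) →
    (∀ c ∈ consumed, ∀ p ∈ ts, c.1 ≤ p.1) →
    (∀ q, bestP best q ↔ ∃ c ∈ consumed, q ≤ c.2) →
    bGo ts us best = (ts.find? (fun p => (consumed ++ us).any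
      (fun u => decide (u.1 ≤ p.1) && decide (p.2 ≤ u.2)))).map Prod.fst := by
  intro ts
  induction ts with
  | nil => intro us best consumed _ _ _ _; rfl
  | cons p ts ih =>
    intro us best consumed hts hus hcons hbest
    obtain ⟨s, e⟩ := p
    obtain ⟨popped, hsplit, hple, hrem, hadvbest⟩ := bAdvance_spec s us best
    have hremgt := hrem hus
    have hkey : ((consumed ++ us).any (fun u => decide (u.1 ≤ s) && decide (e ≤ u.2)) = true)
        ↔ bestP (bAdvance s us best).2 e := by
      rw [hadvbest, hbest]
      simp only [List.any_eq_true, List.mem_append, Bool.and_eq_true, decide_eq_true_eq]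
      constructor
      · rintro ⟨u, hu | hu, h1, h2⟩
        · exact Or.inl ⟨u, hu, h2⟩
        · rw [hsplit] at hu
          rcases List.mem_append.mp hu with hu | hu
          · exact Or.inr ⟨u, hu, h2⟩
          · exact absurd h1 (by have := hremgt u hu; omega)
      · rintro (⟨c, hcm, hq⟩ | ⟨c, hcm, hq⟩)
        · exact ⟨c, Or.inl hcm, hcons c hcm _ List.mem_cons_self, hq⟩
        · exact ⟨c, Or.inr (hsplit ▸ List.mem_append_left _ hcm), hple c hcm, hq⟩
    have hcond : ((match (bAdvance s us best).2 with | none => false | some b => decide (e ≤ b)) = true)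
        ↔ bestP (bAdvance s us best).2 e := by
      cases (bAdvance s us best).2 with
      | none => simp [bestP]
      | some b => simp [bestP]
    by_cases hc : bestP (bAdvance s us best).2 e
    · have hP : (fun p : Int × Int => (consumed ++ us).any
          (fun u => decide (u.1 ≤ p.1) && decide (p.2 ≤ u.2))) (s, e) = true := hkey.mpr hc
      have hfind : List.find? (fun p : Int × Int => (consumed ++ us).any
          (fun u => decide (u.1 ≤ p.1) && decide (p.2 ≤ u.2))) ((s, e) :: ts) = some (s, e) :=
        List.find?_cons_of_pos hP
      rw [bGo_cons, if_pos (hcond.mpr hc), hfind]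
      rfl
    · have hPn : ¬ (fun p : Int × Int => (consumed ++ us).any
          (fun u => decide (u.1 ≤ p.1) && decide (p.2 ≤ u.2))) (s, e) = true :=
        fun h => hc (hkey.mp h)
      have hfind : List.find? (fun p : Int × Int => (consumed ++ us).any
          (fun u => decide (u.1 ≤ p.1) && decide (p.2 ≤ u.2))) ((s, e) :: ts) =
          List.find? (fun p : Int × Int => (consumed ++ us).any
            (fun u => decide (u.1 ≤ p.1) && decide (p.2 ≤ u.2))) ts :=
        List.find?_cons_of_neg hPn
      rw [bGo_cons, if_neg (fun h => hc (hcond.mp h)), hfind]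
      have hl : (consumed ++ popped) ++ (bAdvance s us best).1 = consumed ++ us := by
        rw [List.append_assoc, ← hsplit]
      have hus' : (bAdvance s us best).1.Pairwise (fun a b => a.1 ≤ b.1) :=
        (List.pairwise_append.mp (hsplit ▸ hus)).2.1
      have hhead : ∀ p' ∈ ts, s ≤ p'.1 := fun p' hp' => List.rel_of_pairwise_cons hts hp'
      have hcons' : ∀ c ∈ consumed ++ popped, ∀ p' ∈ ts, c.1 ≤ p'.1 := by
        intro c hcm p' hp'
        rcases List.mem_append.mp hcm with hcm | hcm
        · exact hcons c hcm p' (List.mem_cons_of_mem _ hp')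
        · have := hple c hcm
          have := hhead p' hp'
          omega
      have hbest' : ∀ q, bestP (bAdvance s us best).2 q ↔ ∃ c ∈ consumed ++ popped, q ≤ c.2 := by
        intro q
        rw [hadvbest, hbest]
        simp only [List.mem_append]
        constructor
        · rintro (⟨c, hcm, hq⟩ | ⟨c, hcm, hq⟩)
          · exact ⟨c, Or.inl hcm, hq⟩
          · exact ⟨c, Or.inr hcm, hq⟩
        · rintro ⟨c, hcm | hcm, hq⟩
          · exact Or.inl ⟨c, hcm, hq⟩
          · exact Or.inr ⟨c, hcm, hq⟩
      have hrec := ih (bAdvance s us best).1 (bAdvance s us best).2 (consumed ++ popped)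
        (List.Pairwise.of_cons hts) hus' hcons' hbest'
      rw [hrec, hl]

def sidePred (us : List (List Int)) (d : Int) (p : Int × Int) : Bool :=
  (bPairs us d).any (fun u => decide (u.1 ≤ p.1) && decide (p.2 ≤ u.2))

lemma bPairs_pairwise (l : List (List Int)) (d : Int) :
    (bPairs l d).Pairwise (fun a b => a.1 ≤ b.1) :=
  PySem.List.sorted_pairwise _ _

lemma bSide_eq (ts us : List (List Int)) (d : Int) :
    bSide ts us d = ((bPairs ts d).find? (sidePred us d)).map Prod.fst := by
  unfold bSide sidePred
  have := bGo_find (bPairs ts d) (bPairs us d) none []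
    (bPairs_pairwise ts d) (bPairs_pairwise us d) (by simp) (by simp [bestP])
  simpa using this

lemma mem_bPairs (ts : List (List Int)) (d : Int) (p : Int × Int) :
    p ∈ bPairs ts d ↔ ∃ t ∈ ts, dOk d t ∧ p = (t.getD 0 0, t.getD 1 0) := by
  unfold bPairs
  rw [PySem.List.mem_sorted]
  simp only [List.mem_map, List.mem_filter, decide_eq_true_eq, dOk]
  aesop

lemma sidePred_iff (us : List (List Int)) (d : Int) (p : Int × Int) :
    sidePred us d p = true ↔ ∃ u ∈ us, dOk d u ∧ u.getD 0 0 ≤ p.1 ∧ p.2 ≤ u.getD 1 0 := by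
  unfold sidePred
  simp only [List.any_eq_true, Bool.and_eq_true, decide_eq_true_eq]
  constructor
  · rintro ⟨q, hq, h1, h2⟩
    obtain ⟨u, hu, hok, rfl⟩ := (mem_bPairs us d q).mp hq
    exact ⟨u, hu, hok, h1, h2⟩
  · rintro ⟨u, hu, hok, h1, h2⟩
    exact ⟨(u.getD 0 0, u.getD 1 0), (mem_bPairs us d _).mpr ⟨u, hu, hok, rfl⟩, h1, h2⟩

lemma find?_first_min (P : Int × Int → Bool) : ∀ (l : List (Int × Int)) (p : Int × Int),
    l.Pairwise (fun a b => a.1 ≤ b.1) → l.find? P = some p →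
    ∀ x ∈ l, P x = true → p.1 ≤ x.1 := by
  intro l
  induction l with
  | nil => intro p _ h; simp at h
  | cons a t ih =>
    intro p hp hf x hx hPx
    by_cases hPa : P a = true
    · rw [List.find?_cons_of_pos hPa] at hf
      obtain rfl : a = p := by injection hf
      rcases List.mem_cons.mp hx with rfl | hx
      · exact le_refl _
      · exact List.rel_of_pairwise_cons hp hx
    · rw [List.find?_cons_of_neg hPa] at hf
      rcases List.mem_cons.mp hx with rfl | hx
      · exact absurd hPx hPa
      · exact ih p (List.Pairwise.of_cons hp) hf x hx hPx

lemma bSide_none_iff (ts us : List (List Int)) (d : Int) :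
    bSide ts us d = none ↔ ∀ t ∈ ts, dOk d t → ¬ dCont d t us := by
  rw [bSide_eq]
  rw [Option.map_eq_none_iff, List.find?_eq_none]
  constructor
  · intro h t ht hok hcont
    have hmem : (t.getD 0 0, t.getD 1 0) ∈ bPairs ts d := (mem_bPairs ts d _).mpr ⟨t, ht, hok, rfl⟩
    obtain ⟨u, hu, huok, h1, h2⟩ := hcont
    exact h _ hmem ((sidePred_iff us d _).mpr ⟨u, hu, huok, h1, h2⟩)
  · intro h q hq hP
    obtain ⟨t, ht, hok, rfl⟩ := (mem_bPairs ts d q).mp hq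
    obtain ⟨u, hu, huok, h1, h2⟩ := (sidePred_iff us d _).mp hP
    exact h t ht hok ⟨u, hu, huok, h1, h2⟩

lemma bSide_some_char (ts us : List (List Int)) (d m : Int)
    (h : bSide ts us d = some m) :
    (∃ t ∈ ts, dOk d t ∧ dCont d t us ∧ t.getD 0 0 = m) ∧
    (∀ t ∈ ts, dOk d t → dCont d t us → m ≤ t.getD 0 0) := by
  rw [bSide_eq] at h
  cases hf : (bPairs ts d).find? (sidePred us d) with
  | none => rw [hf] at h; simp at h
  | some q =>
    rw [hf] at h
    simp only [Option.map_some, Option.some.injEq] at h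
    subst h
    have hqmem := List.mem_of_find?_eq_some hf
    have hqP := List.find?_some hf
    constructor
    · obtain ⟨t, ht, hok, hpe⟩ := (mem_bPairs ts d q).mp hqmem
      obtain ⟨u, hu, huok, h1, h2⟩ := (sidePred_iff us d q).mp hqP
      subst hpe
      exact ⟨t, ht, hok, ⟨u, hu, huok, h1, h2⟩, rfl⟩
    · intro t ht hok hcont
      obtain ⟨u, hu, huok, h1, h2⟩ := hcont
      exact find?_first_min _ _ _ (bPairs_pairwise ts d) hf _
        ((mem_bPairs ts d _).mpr ⟨t, ht, hok, rfl⟩)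
        ((sidePred_iff us d _).mpr ⟨u, hu, huok, h1, h2⟩)

-- combined characterisation of B's output
lemma alt_nil_iff (p1 p2 : List (List Int)) (d : Int)
    (h1 : ∀ t ∈ p1, dOk d t → ¬ dCont d t p2) (h2 : ∀ t ∈ p2, dOk d t → ¬ dCont d t p1) :
    earliestPossibleMeeting_alt p1 p2 d = [] := by
  unfold earliestPossibleMeeting_alt
  rw [(bSide_none_iff p1 p2 d).mpr h1, (bSide_none_iff p2 p1 d).mpr h2]

lemma alt_some_char (p1 p2 : List (List Int)) (d : Int)
    (hne : ¬ (∀ x, ¬ QQ p1 p2 d x)) :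
    ∃ m, earliestPossibleMeeting_alt p1 p2 d = [m, m + d] ∧
      (∃ t, QQ p1 p2 d t ∧ t.getD 0 0 = m) ∧ (∀ t, QQ p1 p2 d t → m ≤ t.getD 0 0) := by
  unfold earliestPossibleMeeting_alt
  cases ha : bSide p1 p2 d with
  | none =>
    have hn1 := (bSide_none_iff p1 p2 d).mp ha
    cases hb : bSide p2 p1 d with
    | none =>
      exact absurd (fun x hx => by
        rcases hx with ⟨hm, hok, hcont⟩ | ⟨hm, hok, hcont⟩
        · exact hn1 x hm hok hcont
        · exact (bSide_none_iff p2 p1 d).mp hb x hm hok hcont) hne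
    | some y =>
      obtain ⟨⟨t, ht, hok, hcont, hv⟩, hmin⟩ := bSide_some_char p2 p1 d y hb
      refine ⟨y, rfl, ⟨t, Or.inr ⟨ht, hok, hcont⟩, hv⟩, ?_⟩
      rintro t' (⟨hm, hok', hcont'⟩ | ⟨hm, hok', hcont'⟩)
      · exact absurd hcont' (hn1 t' hm hok')
      · exact hmin t' hm hok' hcont'
  | some x =>
    obtain ⟨⟨t, ht, hok, hcont, hv⟩, hmin⟩ := bSide_some_char p1 p2 d x ha
    cases hb : bSide p2 p1 d with
    | none =>
      refine ⟨x, rfl, ⟨t, Or.inl ⟨ht, hok, hcont⟩, hv⟩, ?_⟩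
      rintro t' (⟨hm, hok', hcont'⟩ | ⟨hm, hok', hcont'⟩)
      · exact hmin t' hm hok' hcont'
      · exact absurd hcont' ((bSide_none_iff p2 p1 d).mp hb t' hm hok')
    | some y =>
      obtain ⟨⟨t2, ht2, hok2, hcont2, hv2⟩, hmin2⟩ := bSide_some_char p2 p1 d y hb
      refine ⟨min x y, rfl, ?_, ?_⟩
      · rcases le_total x y with hxy | hxy
        · exact ⟨t, Or.inl ⟨ht, hok, hcont⟩, by rw [hv]; omega⟩
        · exact ⟨t2, Or.inr ⟨ht2, hok2, hcont2⟩, by rw [hv2]; omega⟩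
      · rintro t' (⟨hm, hok', hcont'⟩ | ⟨hm, hok', hcont'⟩)
        · have := hmin t' hm hok' hcont'; omega
        · have := hmin2 t' hm hok' hcont'; omega

-- A's output, fully characterised
lemma A_char (p1 p2 : List (List Int)) (d : Int) :
    ∃ avail : List (List Int),
      (∀ x, x ∈ avail ↔ QQ p1 p2 d x) ∧
      earliestPossibleMeeting p1 p2 d =
        aFind (avail.foldl (fun m e => if e.getD 0 0 < m then e.getD 0 0 else m) 9999) d avail := by
  have hall : ∀ e ∈ aPairLoop (aFilter p2 d) (aFilter p1 d) (aPairLoop (aFilter p1 d) (aFilter p2 d) []), dOk d e :=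
    fun e he => ((mem_avail p1 p2 d e).mp he).elim (fun h => h.2.1) (fun h => h.2.1)
  have hrm := aRemovePass_id d
    (aPairLoop (aFilter p2 d) (aFilter p1 d) (aPairLoop (aFilter p1 d) (aFilter p2 d) [])).length
    (aPairLoop (aFilter p2 d) (aFilter p1 d) (aPairLoop (aFilter p1 d) (aFilter p2 d) [])) 0 hall
  refine ⟨aPairLoop (aFilter p2 d) (aFilter p1 d) (aPairLoop (aFilter p1 d) (aFilter p2 d) []),
    fun x => mem_avail p1 p2 d x, ?_⟩
  simp only [earliestPossibleMeeting]
  rw [hrm]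
-- ===== VERDICT (by name: the statement is the Claim_ definition above) =====
theorem earliestPossibleMeeting_spec : Claim_unchanged_earliestPossibleMeeting := by
  intro p1 p2 d _ _ hnD
  rw [D_iff] at hnD
  obtain ⟨avail, hmem, hA⟩ := A_char p1 p2 d
  by_cases hq : ∀ x, ¬ QQ p1 p2 d x
  · have hnil : avail = [] := List.eq_nil_iff_forall_not_mem.mpr
      (fun x hx => hq x ((hmem x).mp hx))
    rw [hA, hnil, alt_nil_iff p1 p2 d
      (fun t ht hok hcont => hq t (Or.inl ⟨ht, hok, hcont⟩))
      (fun t ht hok hcont => hq t (Or.inr ⟨ht, hok, hcont⟩))]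
    rfl
  · obtain ⟨m, hBeq, ⟨t0, hQ0, hv0⟩, hmin⟩ := alt_some_char p1 p2 d hq
    have hDex : ((∃ t ∈ p1, dOk d t ∧ dCont d t p2) ∨ (∃ t ∈ p2, dOk d t ∧ dCont d t p1)) := by
      rcases hQ0 with ⟨h1, h2, h3⟩ | ⟨h1, h2, h3⟩
      · exact Or.inl ⟨t0, h1, h2, h3⟩
      · exact Or.inr ⟨t0, h1, h2, h3⟩
    have hsmall : ∃ t, QQ p1 p2 d t ∧ t.getD 0 0 ≤ 9999 := by
      by_contra hno
      push Not at hno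
      exact hnD ⟨hDex,
        fun t ht hok hcont => hno t (Or.inl ⟨ht, hok, hcont⟩),
        fun t ht hok hcont => hno t (Or.inr ⟨ht, hok, hcont⟩)⟩
    obtain ⟨t1, hQ1, h9999⟩ := hsmall
    have ht1av : t1 ∈ avail := (hmem t1).mpr hQ1
    have ht0av : t0 ∈ avail := (hmem t0).mpr hQ0
    obtain ⟨hfle, hfall, hfatt⟩ := minFold_spec avail 9999
    set r := avail.foldl (fun m e => if e.getD 0 0 < m then e.getD 0 0 else m) 9999 with hr
    have hmle : ∀ e ∈ avail, m ≤ e.getD 0 0 := fun e he => hmin e ((hmem e).mp he)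
    have hrm : r = m := by
      have h2 : r ≤ m := hv0 ▸ hfall t0 ht0av
      rcases hfatt with h | ⟨e, he, hev⟩
      · have h3 : m ≤ t1.getD 0 0 := hmin t1 hQ1
        have h4 : r ≤ t1.getD 0 0 := hfall t1 ht1av
        omega
      · have h3 : m ≤ e.getD 0 0 := hmle e he
        omega
    have hatt : ∃ e ∈ avail, e.getD 0 0 = r := ⟨t0, ht0av, hv0.trans hrm.symm⟩
    rw [hA, aFind_attained r d avail hatt, hBeq, hrm]
theorem earliestPossibleMeeting_changed : Claim_changed_earliestPossibleMeeting := by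
  unfold Claim_changed_earliestPossibleMeeting; decide
theorem earliestPossibleMeeting_tight : Claim_exact_earliestPossibleMeeting := by
  intro p1 p2 d _ _ hD
  rw [D_iff] at hD
  obtain ⟨hDex, hall1, hall2⟩ := hD
  obtain ⟨avail, hmem, hA⟩ := A_char p1 p2 d
  have hgt : ∀ e ∈ avail, 9999 < e.getD 0 0 := by
    intro e he
    rcases (hmem e).mp he with ⟨h1, h2, h3⟩ | ⟨h1, h2, h3⟩
    · exact hall1 e h1 h2 h3
    · exact hall2 e h1 h2 h3
  obtain ⟨hfle, hfall, hfatt⟩ := minFold_spec avail 9999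
  set r := avail.foldl (fun m e => if e.getD 0 0 < m then e.getD 0 0 else m) 9999 with hr
  have hAnil : earliestPossibleMeeting p1 p2 d = [] := by
    rw [hA]
    exact aFind_nil r d avail (fun e he => by have := hgt e he; have := hfall e he; omega)
  have hq : ¬ ∀ x, ¬ QQ p1 p2 d x := by
    rcases hDex with ⟨t, ht, hok, hcont⟩ | ⟨t, ht, hok, hcont⟩
    · exact fun h => h t (Or.inl ⟨ht, hok, hcont⟩)
    · exact fun h => h t (Or.inr ⟨ht, hok, hcont⟩)
  obtain ⟨m, hBeq, -, -⟩ := alt_some_char p1 p2 d hq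
  rw [hAnil, hBeq]
  simp
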